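-- pv_equiv track=rewrite | github.com/Divyansh-Kamboj/Dubstech_Datathon | clean_data.py | map_department
-- ===== SOURCE A (Python) =====
-- def map_department(topic):
--     topic_upper = topic.upper()
--     if any(kw in topic_upper for kw in ["HEART", "CORONARY", "HYPERTENSION", "ANGINA", "INFARCTION"]):
--         return "Cardiology"
--     elif "CANCER" in topic_upper:
--         return "Oncology"
--     elif "DIABETES" in topic_upper:
--         return "Endocrinology"
--     elif any(kw in topic_upper for kw in ["DEPRESSION", "ANXIETY", "COUNSELED", "MENTAL HEALTH"]):
--         return "Mental_Health"
--     else: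
--         return "Drop"
-- ===== SOURCE B (Python) =====
-- # Single left-to-right scan over the text: at each position, check which keyword
-- # starts there and keep the best (lowest) priority seen; return that department.
-- _TABLE = [("HEART", 0), ("CORONARY", 0), ("HYPERTENSION", 0), ("ANGINA", 0),
--           ("INFARCTION", 0), ("CANCER", 1), ("DIABETES", 2),
--           ("DEPRESSION", 3), ("ANXIETY", 3), ("COUNSELED", 3), ("MENTAL HEALTH", 3)]
-- _NAMES = ["Cardiology", "Oncology", "Endocrinology", "Mental_Health", "Drop"]
--
-- def map_department(topic):
--     t = topic.upper()
--     best = 4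
--     for i in range(len(t)):
--         for kw, prio in _TABLE:
--             if prio < best and t.startswith(kw, i):
--                 best = prio
--     return _NAMES[best]
-- ===== Notes on version B (the rewrite author's own statement) =====
-- stated objective: alternative
-- what changed: Replaced the elif chain of substring-membership tests by a single position scan of the upper-cased text that checks keyword prefixes at each index and keeps the minimum-priority department found, then indexes a name table.
import Mathlib
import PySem

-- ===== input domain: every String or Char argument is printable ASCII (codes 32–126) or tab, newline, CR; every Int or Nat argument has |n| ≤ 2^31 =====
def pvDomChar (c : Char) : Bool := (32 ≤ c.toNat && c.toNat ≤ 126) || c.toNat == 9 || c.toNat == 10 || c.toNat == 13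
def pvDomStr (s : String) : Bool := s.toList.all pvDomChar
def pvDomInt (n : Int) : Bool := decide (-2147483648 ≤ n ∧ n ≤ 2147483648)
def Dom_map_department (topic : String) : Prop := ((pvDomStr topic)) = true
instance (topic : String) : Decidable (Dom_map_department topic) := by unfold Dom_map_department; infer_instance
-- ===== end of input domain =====

-- B replaces A's elif chain of substring tests by one scan over text positions that
-- keeps the minimum-priority keyword match (objective: alternative, same cost).

-- ===== PORT A =====
def map_department (topic : String) : String :=
  let topic_upper := PySem.Str.upper topic
  if ["HEART", "CORONARY", "HYPERTENSION", "ANGINA", "INFARCTION"].any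
      (fun kw => PySem.Str.isIn kw topic_upper) then "Cardiology"
  else if PySem.Str.isIn "CANCER" topic_upper then "Oncology"
  else if PySem.Str.isIn "DIABETES" topic_upper then "Endocrinology"
  else if ["DEPRESSION", "ANXIETY", "COUNSELED", "MENTAL HEALTH"].any
      (fun kw => PySem.Str.isIn kw topic_upper) then "Mental_Health"
  else "Drop"

-- ===== PORT B =====
def pvTable : List (List Char × Nat) :=
  [("HEART".toList, 0), ("CORONARY".toList, 0), ("HYPERTENSION".toList, 0),
   ("ANGINA".toList, 0), ("INFARCTION".toList, 0), ("CANCER".toList, 1),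
   ("DIABETES".toList, 2), ("DEPRESSION".toList, 3), ("ANXIETY".toList, 3),
   ("COUNSELED".toList, 3), ("MENTAL HEALTH".toList, 3)]

def pvNames : List String := ["Cardiology", "Oncology", "Endocrinology", "Mental_Health", "Drop"]

-- Python's t.startswith(kw, i) with 0 ≤ i ≤ len(t) is exactly: kw is a prefix of t[i:]
-- (Chars.startswith on t.drop i); _NAMES[best] is exact as getD since best is always in [0, 4].
def map_department_alt (topic : String) : String :=
  let t := PySem.Chars.upper topic.toList
  let best := (List.range t.length).foldl
    (fun b i => pvTable.foldl
      (fun b kp => if kp.2 < b ∧ PySem.Chars.startswith (t.drop i) kp.1 = true then kp.2 else b) b) 4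
  pvNames.getD best "Drop"

-- ===== PRECONDITION & SPEC =====
def Spec_map_department (topic : String) (out : String) : Prop := out = map_department_alt topic
instance (topic : String) (out : String) : Decidable (Spec_map_department topic out) := by unfold Spec_map_department; infer_instance

-- ===== CLAIM (what is proved, stated in full; the proofs are below) =====
def Claim_equal_map_department : Prop := ∀ (topic : String), Dom_map_department topic → Spec_map_department topic (map_department topic)

-- ===== LEMMAS AND PROOFS =====

-- priorities of table keywords matching at one position / over all positions
def pvMatches (t : List Char) (i : Nat) : List Nat :=
  pvTable.filterMap (fun kp => if PySem.Chars.startswith (t.drop i) kp.1 then some kp.2 else none)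

def pvAllMatches (t : List Char) : List Nat :=
  (List.range t.length).flatMap (pvMatches t)

lemma foldl_min_le_init (xs : List Nat) (b : Nat) : xs.foldl min b ≤ b := by
  induction xs generalizing b with
  | nil => simp
  | cons x tl ih => exact le_trans (ih (min b x)) (Nat.min_le_left _ _)

lemma foldl_min_le_mem (xs : List Nat) (b x : Nat) (hx : x ∈ xs) : xs.foldl min b ≤ x := by
  induction xs generalizing b with
  | nil => cases hx
  | cons y tl ih =>
    rcases List.mem_cons.mp hx with rfl | h
    · exact le_trans (foldl_min_le_init tl (min b x)) (Nat.min_le_right _ _)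
    · exact ih (min b y) h

lemma foldl_min_mem_or_init (xs : List Nat) (b : Nat) : xs.foldl min b ∈ xs ∨ xs.foldl min b = b := by
  induction xs generalizing b with
  | nil => right; rfl
  | cons y tl ih =>
    rcases ih (min b y) with h | h
    · left; exact List.mem_cons_of_mem _ h
    · rcases Nat.le_total b y with hby | hyb
      · right; simpa [Nat.min_eq_left hby] using h
      · left; rw [List.foldl_cons, h, Nat.min_eq_right hyb]; exact List.mem_cons_self
  
-- B's inner fold over the table = foldl min over the matched priorities at that position
lemma inner_fold_eq (t : List Char) (i : Nat) (b : Nat) :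
    pvTable.foldl
      (fun b kp => if kp.2 < b ∧ PySem.Chars.startswith (t.drop i) kp.1 = true then kp.2 else b) b
    = (pvMatches t i).foldl min b := by
  unfold pvMatches
  generalize pvTable = L
  induction L generalizing b with
  | nil => rfl
  | cons kp tl ih =>
    simp only [List.foldl_cons, List.filterMap_cons]
    by_cases hs : PySem.Chars.startswith (t.drop i) kp.1 = true
    · rw [if_pos hs]
      by_cases hlt : kp.2 < b
      · rw [if_pos (by exact ⟨hlt, hs⟩), List.foldl_cons, ih, Nat.min_eq_right (Nat.le_of_lt hlt)]
      · rw [if_neg (fun h => hlt h.1), List.foldl_cons, ih, Nat.min_eq_left (Nat.le_of_not_lt hlt)]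
    · rw [if_neg hs, if_neg (fun h => hs h.2)]
      exact ih b

-- B's outer fold = foldl min over all matched priorities
lemma outer_fold_aux (t : List Char) (is : List Nat) (b : Nat) :
    is.foldl
      (fun b i => pvTable.foldl
        (fun b kp => if kp.2 < b ∧ PySem.Chars.startswith (t.drop i) kp.1 = true then kp.2 else b) b) b
    = (is.flatMap (pvMatches t)).foldl min b := by
  induction is generalizing b with
  | nil => simp
  | cons i tl ih =>
    rw [List.foldl_cons, List.flatMap_cons, List.foldl_append, inner_fold_eq]
    exact ih _

lemma outer_fold_eq (t : List Char) :
    (List.range t.length).foldl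
      (fun b i => pvTable.foldl
        (fun b kp => if kp.2 < b ∧ PySem.Chars.startswith (t.drop i) kp.1 = true then kp.2 else b) b) 4
    = (pvAllMatches t).foldl min 4 :=
  outer_fold_aux t (List.range t.length) 4

lemma mem_allMatches_iff (t : List Char) (p : Nat) :
    p ∈ pvAllMatches t ↔
      ∃ kp ∈ pvTable, kp.2 = p ∧ ∃ i < t.length, PySem.Chars.startswith (t.drop i) kp.1 = true := by
  unfold pvAllMatches pvMatches
  constructor
  · intro h
    rcases List.mem_flatMap.mp h with ⟨i, hi, hm⟩
    rcases List.mem_filterMap.mp hm with ⟨kp, hkp, hif⟩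
    by_cases hs : PySem.Chars.startswith (t.drop i) kp.1 = true
    · rw [if_pos hs] at hif
      exact ⟨kp, hkp, (Option.some_inj.mp hif).symm ▸ rfl, i, List.mem_range.mp hi, hs⟩
    · rw [if_neg hs] at hif; cases hif
  · rintro ⟨kp, hkp, rfl, i, hi, hs⟩
    exact List.mem_flatMap.mpr ⟨i, List.mem_range.mpr hi,
      List.mem_filterMap.mpr ⟨kp, hkp, by rw [if_pos hs]⟩⟩

-- a nonempty keyword occurs as a substring iff it starts at some position i < length
lemma isIn_iff_hit (kw t : List Char) (hk : kw ≠ []) :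
    PySem.Chars.isIn kw t = true ↔ ∃ i < t.length, PySem.Chars.startswith (t.drop i) kw = true := by
  rw [← PySem.Chars.exists_prefix_drop_iff_isIn]
  constructor
  · rintro ⟨j, hj⟩
    by_cases h : j < t.length
    · exact ⟨j, h, (PySem.Chars.startswith_iff _ _).mpr hj⟩
    · exfalso
      rw [List.drop_eq_nil_of_le (Nat.le_of_not_lt h)] at hj
      exact hk (List.prefix_nil.mp hj)
  · rintro ⟨i, _, h⟩
    exact ⟨i, (PySem.Chars.startswith_iff _ _).mp h⟩

-- group p has a match in the scan iff some keyword of group p is a substring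
lemma group_mem_iff (t : List Char) (p : Nat) :
    p ∈ pvAllMatches t ↔
      ∃ kp ∈ pvTable, kp.2 = p ∧ PySem.Chars.isIn kp.1 t = true := by
  rw [mem_allMatches_iff]
  constructor
  · rintro ⟨kp, hkp, hp, hhit⟩
    refine ⟨kp, hkp, hp, ?_⟩
    have hne : kp.1 ≠ [] := by
      fin_cases hkp <;> simp
    exact (isIn_iff_hit kp.1 t hne).mpr hhit
  · rintro ⟨kp, hkp, hp, hin⟩
    have hne : kp.1 ≠ [] := by
      fin_cases hkp <;> simp
    exact ⟨kp, hkp, hp, (isIn_iff_hit kp.1 t hne).mp hin⟩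

lemma mem_allMatches_le (t : List Char) (p : Nat) (hp : p ∈ pvAllMatches t) : p ≤ 3 := by
  rcases (mem_allMatches_iff t p).mp hp with ⟨kp, hkp, hkp2, -⟩
  fin_cases hkp <;> omega

-- ===== VERDICT (by name: the statement is the Claim_ definition above) =====
theorem map_department_spec : Claim_equal_map_department := by
  intro topic _
  unfold Spec_map_department map_department map_department_alt
  simp only [PySem.Str.isIn_eq, PySem.Str.toList_upper]
  set t := PySem.Chars.upper topic.toList with ht
  rw [outer_fold_eq]
  set best := (pvAllMatches t).foldl min 4 with hbest
  have hmem := foldl_min_mem_or_init (pvAllMatches t) 4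
  rw [← hbest] at hmem
  have h0 : (0 ∈ pvAllMatches t) ↔
      (PySem.Chars.isIn "HEART".toList t = true ∨ PySem.Chars.isIn "CORONARY".toList t = true ∨
       PySem.Chars.isIn "HYPERTENSION".toList t = true ∨ PySem.Chars.isIn "ANGINA".toList t = true ∨
       PySem.Chars.isIn "INFARCTION".toList t = true) := by
    rw [group_mem_iff]; simp [pvTable]
  have h1 : (1 ∈ pvAllMatches t) ↔ PySem.Chars.isIn "CANCER".toList t = true := by
    rw [group_mem_iff]; simp [pvTable]
  have h2 : (2 ∈ pvAllMatches t) ↔ PySem.Chars.isIn "DIABETES".toList t = true := by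
    rw [group_mem_iff]; simp [pvTable]
  have h3 : (3 ∈ pvAllMatches t) ↔
      (PySem.Chars.isIn "DEPRESSION".toList t = true ∨ PySem.Chars.isIn "ANXIETY".toList t = true ∨
       PySem.Chars.isIn "COUNSELED".toList t = true ∨ PySem.Chars.isIn "MENTAL HEALTH".toList t = true) := by
    rw [group_mem_iff]; simp [pvTable]
  simp only [List.any_cons, List.any_nil, Bool.or_eq_true, Bool.false_eq_true, or_false]
  by_cases c0 : (0 ∈ pvAllMatches t)
  · have hb : best = 0 := Nat.le_zero.mp (foldl_min_le_mem _ _ _ c0)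
    rw [if_pos (h0.mp c0), hb]; rfl
  · rw [if_neg (fun h => c0 (h0.mpr h))]
    by_cases c1 : (1 ∈ pvAllMatches t)
    · have hb1 : best ≤ 1 := foldl_min_le_mem _ _ _ c1
      have hb : best = 1 := by
        rcases hmem with h | h
        · interval_cases best
          · exact absurd h c0
          · rfl
        · omega
      rw [if_pos (h1.mp c1), hb]; rfl
    · rw [if_neg (fun h => c1 (h1.mpr h))]
      by_cases c2 : (2 ∈ pvAllMatches t)
      · have hb2 : best ≤ 2 := foldl_min_le_mem _ _ _ c2
        have hb : best = 2 := by
          rcases hmem with h | h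
          · interval_cases best
            · exact absurd h c0
            · exact absurd h c1
            · rfl
          · omega
        rw [if_pos (h2.mp c2), hb]; rfl
      · rw [if_neg (fun h => c2 (h2.mpr h))]
        by_cases c3 : (3 ∈ pvAllMatches t)
        · have hb3 : best ≤ 3 := foldl_min_le_mem _ _ _ c3
          have hb : best = 3 := by
            rcases hmem with h | h
            · interval_cases best
              · exact absurd h c0
              · exact absurd h c1
              · exact absurd h c2
              · rfl
            · omega
          rw [if_pos (h3.mp c3), hb]; rfl
        · rw [if_neg (fun h => c3 (h3.mpr h))]
          have hb : best = 4 := by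
            rcases hmem with h | h
            · have hle := mem_allMatches_le t best h
              have hle4 : best ≤ 4 := foldl_min_le_init _ _
              interval_cases best
              · exact absurd h c0
              · exact absurd h c1
              · exact absurd h c2
              · exact absurd h c3
            · exact h
          rw [hb]; rfl
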